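-- pv_equiv track=rewrite | github.com/Kdelphinus/Python_study | Baekjoon/silver/silver V/1308_D-Day.py | first_year
-- ===== SOURCE A (Python) =====
-- MONTH = (-1, 31, (28, 29), 31, 30, 31, 30, 31, 31, 30, 31, 30, 31)
--
-- def is_leap_year(y: int) -> int:
--     if y % 400 == 0:
--         return 1
--     if y % 4 == 0 and y % 100:
--         return 1
--     return 0
--
-- def first_year(t: list) -> int:
--     y, m, d = t
--     ans = MONTH[m][(is_leap_year(y))] - d if m == 2 else MONTH[m] - d
--     ans += 1
--     m += 1
--     while m < 13:
--         ans += MONTH[m][(is_leap_year(y))] if m == 2 else MONTH[m]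
--         m += 1
--     return ans
-- ===== SOURCE B (Python) =====
-- MONTH = (-1, 31, (28, 29), 31, 30, 31, 30, 31, 31, 30, 31, 30, 31)
--
-- def is_leap_year(y: int) -> int:
--     if y % 400 == 0:
--         return 1
--     if y % 4 == 0 and y % 100:
--         return 1
--     return 0
--
-- def first_year(t: list) -> int:
--     y, m, d = t
--     leap = is_leap_year(y)
--     total = 365 + leap
--     elapsed = d
--     for month in range(1, m):
--         elapsed += MONTH[month][leap] if month == 2 else MONTH[month]
--     return total - elapsed + 1
-- ===== Notes on version B (the rewrite author's own statement) =====
-- stated objective: simpler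
-- what changed: B computes the elapsed day-of-year by summing the months BEFORE the given date and subtracts it from the full year length 365+leap, instead of A's suffix sum over the remaining months via a while loop.
-- outside the precondition, e.g. on first_year([2000, 0, 5]): A returns 361, B returns 362; on first_year([2000, -1, 1]): A returns 396, B returns 366
import Mathlib
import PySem

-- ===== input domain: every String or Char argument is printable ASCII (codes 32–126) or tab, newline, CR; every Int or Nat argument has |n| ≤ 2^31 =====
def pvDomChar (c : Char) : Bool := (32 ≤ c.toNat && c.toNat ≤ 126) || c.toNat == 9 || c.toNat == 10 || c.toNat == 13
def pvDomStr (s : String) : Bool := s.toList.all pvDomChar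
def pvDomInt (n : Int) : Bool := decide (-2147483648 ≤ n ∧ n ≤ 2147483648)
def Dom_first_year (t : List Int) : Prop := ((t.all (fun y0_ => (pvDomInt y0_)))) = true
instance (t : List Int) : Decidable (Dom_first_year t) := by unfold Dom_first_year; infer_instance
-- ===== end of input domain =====

-- B replaces A's suffix-sum while loop over the remaining months by the complement form
-- (365 + leap) - (days elapsed before the date) + 1, summing the months BEFORE m instead (simpler decomposition).


-- ===== PORT A =====
-- MONTH, with the heterogeneous tuple at index 2 split off: MONTH[m] for m ≠ 2 (ints) …
def MONTH_ints : List Int := [-1, 31, 0, 31, 30, 31, 30, 31, 31, 30, 31, 30, 31]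
-- … and MONTH[2][leap] = (28, 29)[leap]; exact since is_leap_year only returns 0 or 1
def MONTH_feb (leap : Int) : Int := if leap = 1 then 29 else 28

def is_leap_year (y : Int) : Int :=
  if PySem.Int.mod y 400 = 0 then 1
  else if PySem.Int.mod y 4 = 0 ∧ PySem.Int.mod y 100 ≠ 0 then 1
  else 0

-- one month's contribution: MONTH[m][(is_leap_year(y))] if m == 2 else MONTH[m]
-- (pyGet? raises = none outside -13..12; Pre_ keeps indices in 1..12, .getD 0 is never taken)
def monthTerm (y m : Int) : Int :=
  if m = 2 then MONTH_feb (is_leap_year y) else (PySem.List.pyGet? MONTH_ints m).getD 0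

-- while m < 13: ans += …; m += 1   (fuel (13 - m).toNat = the loop's exact trip count)
def fyLoop (fuel : Nat) (y m ans : Int) : Int :=
  match fuel with
  | 0 => ans
  | n + 1 => if m < 13 then fyLoop n y (m + 1) (ans + monthTerm y m) else ans

def first_year (t : List Int) : Int :=
  match t with
  | [y, m, d] => fyLoop (13 - (m + 1)).toNat y (m + 1) (monthTerm y m - d + 1)
  | _ => 0    -- unpacking 'y, m, d = t' raises for other lengths; excluded by Pre_

-- ===== PORT B =====
-- B-side copies of the same module constants/helper (Source B defines them identically)
def MONTH_ints_b : List Int := [-1, 31, 0, 31, 30, 31, 30, 31, 31, 30, 31, 30, 31]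
def MONTH_feb_b (leap : Int) : Int := if leap = 1 then 29 else 28
def is_leap_year_b (y : Int) : Int :=
  if PySem.Int.mod y 400 = 0 then 1
  else if PySem.Int.mod y 4 = 0 ∧ PySem.Int.mod y 100 ≠ 0 then 1
  else 0

-- 'y, m, d = t' (raises unless len(t) == 3; excluded by Pre_), rendered via a length guard
def first_year_alt (t : List Int) : Int :=
  if t.length = 3 then
    let y := t.getD 0 0
    let m := t.getD 1 0
    let d := t.getD 2 0
    let leap := is_leap_year_b y
    let total := 365 + leap
    let elapsed := (PySem.List.pyRange 1 m 1).foldl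
      (fun acc month => acc + (if month = 2 then MONTH_feb_b leap else (PySem.List.pyGet? MONTH_ints_b month).getD 0)) d
    total - elapsed + 1
  else 0

-- ===== PRECONDITION & SPEC =====
-- Pre_ restricts to the task's domain, a date [y, m, d] with a valid month 1..12: on other
-- lengths A raises ValueError, on m > 12 or m ≤ -11 it raises IndexError/TypeError, and on
-- m in -10..0 it returns accidental negative-index-wraparound values that are no date count.
def Pre_first_year (t : List Int) : Prop :=
  t.length = 3 ∧ 1 ≤ t.getD 1 0 ∧ t.getD 1 0 ≤ 12
instance (t : List Int) : Decidable (Pre_first_year t) := by unfold Pre_first_year; infer_instance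

def pvWitness_first_year : List Int := [2024, 2, 29]

def Spec_first_year (t : List Int) (out : Int) : Prop := out = first_year_alt t
instance (t : List Int) (out : Int) : Decidable (Spec_first_year t out) := by unfold Spec_first_year; infer_instance

-- ===== CLAIM (what is proved, stated in full; the proofs are below) =====
def Claim_equal_first_year : Prop :=
  ∀ (t : List Int), Dom_first_year t → Pre_first_year t → Spec_first_year t (first_year t)

-- ===== LEMMAS AND PROOFS =====
lemma leap_cases (y : Int) : is_leap_year y = 0 ∨ is_leap_year y = 1 := by
  unfold is_leap_year; split_ifs <;> simp

-- ===== VERDICT (by name: the statement is the Claim_ definition above) =====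
theorem first_year_spec : Claim_equal_first_year := by
  intro t _ hpre
  obtain ⟨hlen, hm1, hm2⟩ := hpre
  match t with
  | [y, m, d] =>
    simp only [List.getD, List.getElem?_cons_succ, List.getElem?_cons_zero, Option.getD_some] at hm1 hm2
    unfold Spec_first_year
    have hb : is_leap_year_b y = is_leap_year y := rfl
    rcases leap_cases y with h | h <;>
      interval_cases m <;>
        simp [first_year, first_year_alt, fyLoop, monthTerm, MONTH_feb, MONTH_ints, MONTH_feb_b, MONTH_ints_b, hb,
              PySem.List.pyRange, PySem.List.pyGet?, PySem.List.pyIdx?, h, List.range_succ] <;> omega
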